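-- pv_equiv track=rewrite | github.com/AUXSPACEeV/aurora | tools/influx_to_csv.py | group_samples
-- ===== SOURCE A (Python) =====
-- def group_samples(samples, window_ns):
--         """Yield groups of samples whose timestamps fall within window_ns of
--         the first sample in the group.
--         """
--         group = []
--         group_start = None
--         for sample in samples:
--                 ts = sample[2]
--                 if group_start is None or ts - group_start > window_ns:
--                         if group:
--                                 yield group
--                         group = [sample]
--                         group_start = ts
--                 else:
--                         group.append(sample)
--         if group:
--                 yield group
-- ===== SOURCE B (Python) =====
-- def group_samples(samples, window_ns):
--     """Yield groups of samples whose timestamps fall within window_ns of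
--     the first sample in the group.
--
--     Staged approach: materialize the samples, compute the list of cut
--     indices (positions where a new group starts), then yield slices
--     between consecutive cuts.
--     """
--     samples = list(samples)
--     cuts = []
--     start = None
--     for i, s in enumerate(samples):
--         ts = s[2]
--         if start is None or ts - start > window_ns:
--             cuts.append(i)
--             start = ts
--     for a, b in zip(cuts, cuts[1:] + [len(samples)]):
--         yield samples[a:b]
-- ===== Notes on version B (the rewrite author's own statement) =====
-- stated objective: alternative
-- what changed: Replaces A's single-pass accumulator loop (mutable group list flushed at each boundary) with two staged passes: first compute the list of cut indices where groups start, then emit the groups as slices between consecutive cuts.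
import Mathlib
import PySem

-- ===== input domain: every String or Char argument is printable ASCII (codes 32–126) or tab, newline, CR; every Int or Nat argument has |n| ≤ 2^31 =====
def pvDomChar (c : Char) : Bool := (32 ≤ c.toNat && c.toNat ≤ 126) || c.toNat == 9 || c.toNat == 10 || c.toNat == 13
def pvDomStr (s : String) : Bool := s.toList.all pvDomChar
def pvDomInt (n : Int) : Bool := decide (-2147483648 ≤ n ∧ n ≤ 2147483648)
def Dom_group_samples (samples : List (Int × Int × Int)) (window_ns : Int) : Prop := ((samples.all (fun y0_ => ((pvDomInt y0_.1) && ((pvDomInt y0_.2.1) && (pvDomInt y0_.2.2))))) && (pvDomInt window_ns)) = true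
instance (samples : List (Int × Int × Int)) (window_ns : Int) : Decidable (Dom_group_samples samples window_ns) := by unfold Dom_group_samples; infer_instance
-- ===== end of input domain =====

-- B replaces A's single-pass accumulator loop with two staged passes (cut indices, then
-- slices between consecutive cuts); same values, alternative decomposition, same cost.

-- ===== PORT A =====
-- A's for-loop carrying (group, group_start), yielding groups; transcribed as structural
-- recursion on the remaining samples with the same state, emitted groups concatenated in order.
def pvAgo (window_ns : Int) : List (Int × Int × Int) → List (Int × Int × Int) → Option Int →
    List (List (Int × Int × Int))
  | [], group, _ => if group.isEmpty then [] else [group]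
  | sample :: rest, group, group_start =>
      let ts := sample.2.2
      -- `group_start is None or ts - group_start > window_ns`
      match group_start with
      | none =>
          (if group.isEmpty then [] else [group]) ++ pvAgo window_ns rest [sample] (some ts)
      | some g =>
          if ts - g > window_ns then
            (if group.isEmpty then [] else [group]) ++ pvAgo window_ns rest [sample] (some ts)
          else
            pvAgo window_ns rest (group ++ [sample]) (some g)

def group_samples (samples : List (Int × Int × Int)) (window_ns : Int) :
    List (List (Int × Int × Int)) :=
  pvAgo window_ns samples [] none

-- ===== PORT B =====
-- Source B's first pass: enumerate the samples, recording the index of each group start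
-- while threading `start` exactly as the Python loop does.
def pvBcuts (window_ns : Int) : List (Int × Int × Int) → Int → Option Int → List Int
  | [], _, _ => []
  | s :: rest, i, none => i :: pvBcuts window_ns rest (i + 1) (some s.2.2)
  | s :: rest, i, some g =>
      if s.2.2 - g > window_ns then i :: pvBcuts window_ns rest (i + 1) (some s.2.2)
      else pvBcuts window_ns rest (i + 1) (some g)

-- Source B's second pass: `for a, b in zip(cuts, cuts[1:] + [len(samples)]): yield samples[a:b]`.
def group_samples_alt (samples : List (Int × Int × Int)) (window_ns : Int) :
    List (List (Int × Int × Int)) :=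
  let cuts := pvBcuts window_ns samples 0 none
  (cuts.zip (cuts.drop 1 ++ [(samples.length : Int)])).map
    (fun p => PySem.List.slice samples (some p.1) (some p.2))

-- ===== PRECONDITION & SPEC =====
def Spec_group_samples (samples : List (Int × Int × Int)) (window_ns : Int) (out : List (List (Int × Int × Int))) : Prop := out = group_samples_alt samples window_ns
instance (samples : List (Int × Int × Int)) (window_ns : Int) (out : List (List (Int × Int × Int))) : Decidable (Spec_group_samples samples window_ns out) := by unfold Spec_group_samples; infer_instance

-- ===== CLAIM (what is proved, stated in full; the proofs are below) =====
def Claim_equal_group_samples : Prop := ∀ (samples : List (Int × Int × Int)) (window_ns : Int), Dom_group_samples samples window_ns → Spec_group_samples samples window_ns (group_samples samples window_ns)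

-- ===== LEMMAS AND PROOFS =====

-- Common reference shape: groups of `rest` given open group `cur` (nonempty) started at `g`.
def pvGws (w : Int) : List (Int × Int × Int) → Int → List (Int × Int × Int) →
    List (List (Int × Int × Int))
  | [], _, cur => [cur]
  | s :: rest, g, cur =>
      if s.2.2 - g > w then cur :: pvGws w rest s.2.2 [s]
      else pvGws w rest g (cur ++ [s])

theorem pvAgo_eq_gws (w : Int) (rest : List (Int × Int × Int)) :
    ∀ (g : Int) (cur : List (Int × Int × Int)), cur ≠ [] →
      pvAgo w rest cur (some g) = pvGws w rest g cur := by
  induction rest with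
  | nil =>
      intro g cur h
      simp [pvAgo, pvGws, List.isEmpty_iff, h]
  | cons s rest ih =>
      intro g cur h
      by_cases hc : s.2.2 - g > w
      · simp [pvAgo, pvGws, hc, List.isEmpty_iff, h, ih s.2.2 [s] (by simp)]
      · simp [pvAgo, pvGws, hc, ih g (cur ++ [s]) (by simp)]

-- View of B's second pass: slices between consecutive cuts, last cut running to the end.
def pvSlices (xs : List (Int × Int × Int)) : Int → List Int → List (List (Int × Int × Int))
  | prev, [] => [PySem.List.slice xs (some prev) (some (xs.length : Int))]
  | prev, c :: cs => PySem.List.slice xs (some prev) (some c) :: pvSlices xs c cs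

theorem zip_map_eq_pvSlices (xs : List (Int × Int × Int)) (cs : List Int) :
    ∀ prev : Int,
      (((prev :: cs).zip (cs ++ [(xs.length : Int)])).map
        (fun p => PySem.List.slice xs (some p.1) (some p.2))) = pvSlices xs prev cs := by
  induction cs with
  | nil => intro prev; simp [pvSlices]
  | cons c cs ih => intro prev; simp [pvSlices, ih c]

theorem pvSlices_cuts_eq_gws (w : Int) (xs : List (Int × Int × Int)) :
    ∀ (rest : List (Int × Int × Int)) (i a : ℕ) (g : Int),
      rest = xs.drop i → a ≤ i →
      pvSlices xs (a : Int) (pvBcuts w rest (i : Int) (some g)) =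
        pvGws w rest g ((xs.drop a).take (i - a)) := by
  intro rest
  induction rest with
  | nil =>
      intro i a g hd _
      have hlen : xs.length ≤ i := by
        have := congrArg List.length hd
        simp at this
        omega
      have h1 : (xs.drop a).take (i - a) = xs.drop a :=
        List.take_of_length_le (by simp; omega)
      have h2 : (xs.drop a).take (xs.length - a) = xs.drop a :=
        List.take_of_length_le (by simp)
      simp [pvBcuts, pvSlices, pvGws, PySem.List.slice_natCast, h1, h2]
  | cons s rest ih =>
      intro i a g hd ha
      have hget : xs[i]? = some s := by
        have : (xs.drop i)[0]? = some s := by rw [← hd]; simp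
        simpa using this
      have hd' : rest = xs.drop (i + 1) := by
        have : (xs.drop i).drop 1 = rest := by rw [← hd]; simp
        simpa [List.drop_drop] using this.symm
      have htake1 : (xs.drop i).take 1 = [s] := by rw [← hd]; simp
      by_cases hc : s.2.2 - g > w
      · have push1 : ((i : Int) + 1) = ((i + 1 : ℕ) : Int) := by push_cast; ring
        have hIH := ih (i + 1) i s.2.2 hd' (by omega)
        simp only [pvBcuts, hc, if_pos, pvSlices, pvGws]
        rw [push1, hIH]
        have : (i + 1) - i = 1 := by omega
        rw [this, htake1, PySem.List.slice_natCast]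
      · have push1 : ((i : Int) + 1) = ((i + 1 : ℕ) : Int) := by push_cast; ring
        have hIH := ih (i + 1) a g hd' (by omega)
        simp only [pvBcuts, hc, pvGws, if_false]
        rw [push1, hIH]
        have hsucc : i + 1 - a = (i - a) + 1 := by omega
        have hidx : (xs.drop a)[i - a]? = some s := by
          rw [List.getElem?_drop]
          have : a + (i - a) = i := by omega
          rw [this, hget]
        rw [hsucc, List.take_add_one, hidx]
        simp

-- ===== VERDICT (by name: the statement is the Claim_ definition above) =====
theorem group_samples_spec : Claim_equal_group_samples := by
  intro samples window_ns _
  unfold Spec_group_samples group_samples group_samples_alt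
  cases samples with
  | nil => simp [pvAgo, pvBcuts]
  | cons s rest =>
      simp only [pvAgo, pvBcuts, List.isEmpty_nil]
      rw [pvAgo_eq_gws window_ns rest s.2.2 [s] (by simp)]
      have e01 : ((0 : Int) + 1) = 1 := by norm_num
      rw [e01]
      have h0 : ((0 : Int) :: pvBcuts window_ns rest 1 (some s.2.2)).drop 1 =
          pvBcuts window_ns rest 1 (some s.2.2) := by simp
      rw [h0, zip_map_eq_pvSlices]
      have h1 : ((1 : Int)) = ((1 : ℕ) : Int) := by norm_num
      have h0' : ((0 : Int)) = ((0 : ℕ) : Int) := by norm_num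
      rw [h1, h0', pvSlices_cuts_eq_gws window_ns (s :: rest) rest 1 0 s.2.2 (by simp) (by omega)]
      simp
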